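-- pv_equiv track=rewrite | github.com/JakeMartin99/ImageCompressor | main.py | space_img
-- ===== SOURCE A (Python) =====
-- from copy import deepcopy
--
-- WHITE = (255, 255, 255)
--
-- def space_img(pix):
--     pixels = deepcopy(pix)
--     res = [len(pix), len(pix[0])]
--     for i in range(res[0]):
--         for j in range(res[1]):
--             if i*j%2 == 0:
--                 pixels[i][j] = WHITE
--     return pixels
-- ===== SOURCE B (Python) =====
-- WHITE = (255, 255, 255)
--
-- def space_img(pix):
--     cols = len(pix[0])
--     out = []
--     for i, row in enumerate(pix):
--         new = list(row)
--         if i % 2: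
--             new[0:cols:2] = [WHITE] * ((cols + 1) // 2)
--         else:
--             new[0:cols] = [WHITE] * cols
--         out.append(new)
--     return out
-- ===== Notes on version B (the rewrite author's own statement) =====
-- stated objective: alternative
-- what changed: Instead of deepcopying the grid and testing i*j%2 per cell in nested index loops, B works row by row with slice assignment: even rows get their first cols cells overwritten with WHITE at once, odd rows get a stride-2 slice assignment whitening the even columns; Pre_ excludes empty grids and ragged grids with a row shorter than row 0 (A raises IndexError on any short even-index row and on most short odd rows; the remaining short-row shapes are excluded with them as the same degenerate raggedness).
import Mathlib
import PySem

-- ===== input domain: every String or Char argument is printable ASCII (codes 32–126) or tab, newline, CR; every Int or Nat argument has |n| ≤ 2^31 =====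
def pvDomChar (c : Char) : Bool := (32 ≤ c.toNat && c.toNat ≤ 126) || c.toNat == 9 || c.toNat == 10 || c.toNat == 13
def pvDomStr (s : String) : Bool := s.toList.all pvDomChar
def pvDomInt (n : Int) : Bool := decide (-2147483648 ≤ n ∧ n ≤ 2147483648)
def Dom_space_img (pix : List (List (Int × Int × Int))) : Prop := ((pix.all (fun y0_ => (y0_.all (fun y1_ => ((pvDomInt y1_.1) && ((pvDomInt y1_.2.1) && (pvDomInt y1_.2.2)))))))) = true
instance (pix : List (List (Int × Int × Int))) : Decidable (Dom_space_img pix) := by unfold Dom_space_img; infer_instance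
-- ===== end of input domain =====

-- B replaces A's deepcopy + per-cell i*j%2 test in nested index loops by per-row slice
-- assignments: even rows get their first cols cells whitened at once, odd rows a stride-2
-- whitening of the even columns (alternative decomposition, same cost).

def WHITE : Int × Int × Int := (255, 255, 255)

-- ===== PORT A =====
-- pixels = deepcopy(pix); res = [len(pix), len(pix[0])]; nested loops assign WHITE when i*j%2==0
def space_img (pix : List (List (Int × Int × Int))) : List (List (Int × Int × Int)) :=
  let res0 := pix.length
  let res1 := (pix.headD []).length   -- len(pix[0]); Python raises on empty pix (outside Pre_)
  (List.range res0).foldl (fun pixels i =>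
    (List.range res1).foldl (fun pixels j =>
      if i * j % 2 = 0 then pixels.modify i (fun row => row.set j WHITE) else pixels)
      pixels) pix

-- ===== PORT B =====
-- cols = len(pix[0]); for i, row in enumerate(pix): new = list(row);
--   odd i:  new[0:cols:2] = [WHITE] * ((cols+1)//2)   (stride-2 slice assignment,
--           ported as setting indices 0,2,...; exact whenever the slice lengths match,
--           which holds on every input Pre_ admits)
--   even i: new[0:cols] = [WHITE] * cols              (ported as replicate ++ drop)
def space_img_alt (pix : List (List (Int × Int × Int))) : List (List (Int × Int × Int)) :=
  let cols := (pix.headD []).length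
  (PySem.List.enumerate pix).map (fun p =>
    if p.1 % 2 ≠ 0 then
      (List.range ((cols + 1) / 2)).foldl (fun r t => r.set (2 * t) WHITE) p.2
    else
      List.replicate cols WHITE ++ p.2.drop cols)

-- ===== PRECONDITION & SPEC =====
-- Pre_ excludes empty grids (pix[0] raises IndexError) and ragged grids with a row
-- shorter than row 0: A raises IndexError on any short even-index row and on most short
-- odd rows; the remaining short-row shapes are excluded with them as the same raggedness.
def Pre_space_img (pix : List (List (Int × Int × Int))) : Prop :=
  pix ≠ [] ∧ ∀ row ∈ pix, (pix.headD []).length ≤ row.length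
instance (pix : List (List (Int × Int × Int))) : Decidable (Pre_space_img pix) := by
  unfold Pre_space_img; infer_instance
def pvWitness_space_img : (List (List (Int × Int × Int))) :=
  [[(1, 2, 3), (4, 5, 6)], [(7, 8, 9), (10, 11, 12)]]
def Spec_space_img (pix : List (List (Int × Int × Int))) (out : List (List (Int × Int × Int))) : Prop := out = space_img_alt pix
instance (pix : List (List (Int × Int × Int))) (out : List (List (Int × Int × Int))) : Decidable (Spec_space_img pix out) := by unfold Spec_space_img; infer_instance

-- ===== CLAIM (what is proved, stated in full; the proofs are below) =====
def Claim_equal_space_img : Prop := ∀ (pix : List (List (Int × Int × Int))), Dom_space_img pix → Pre_space_img pix → Spec_space_img pix (space_img pix)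

-- ===== LEMMAS AND PROOFS =====

-- row-level form of A's inner loop
def pvRowOp (cols i : Nat) (row : List (Int × Int × Int)) : List (Int × Int × Int) :=
  (List.range cols).foldl (fun r j => if i * j % 2 = 0 then r.set j WHITE else r) row

theorem pvModify_id (s : List (List (Int × Int × Int))) (i : Nat) :
    s.modify i (fun r => r) = s := by
  apply List.ext_getElem?
  intro k
  simp [List.getElem?_modify]

theorem pvModify_modify (s : List (List (Int × Int × Int))) (i : Nat)
    (f g : List (Int × Int × Int) → List (Int × Int × Int)) :
    (s.modify i f).modify i g = s.modify i (fun r => g (f r)) := by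
  apply List.ext_getElem?
  intro k
  simp only [List.getElem?_modify]
  cases s[k]? with
  | none => simp
  | some r => by_cases h : i = k <;> simp [h]

-- collapse A's inner loop into a single modify
theorem pvInnerCollapse (l : List Nat) (i : Nat) (s : List (List (Int × Int × Int))) :
    l.foldl (fun s j => if i * j % 2 = 0 then s.modify i (fun row => row.set j WHITE) else s) s
      = s.modify i (fun row =>
          l.foldl (fun r j => if i * j % 2 = 0 then r.set j WHITE else r) row) := by
  induction l generalizing s with
  | nil => simp [pvModify_id]
  | cons a t ih =>
      simp only [List.foldl_cons]
      by_cases h : i * a % 2 = 0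
      · simp only [h, if_true, ih, pvModify_modify]
      · simp only [h, if_false, ih]

-- elementwise form of A's outer loop
theorem pvOuterElem (pix : List (List (Int × Int × Int))) (cols : Nat) (n k : Nat) :
    ((List.range n).foldl (fun pixels i =>
        (List.range cols).foldl (fun pixels j =>
          if i * j % 2 = 0 then pixels.modify i (fun row => row.set j WHITE) else pixels)
          pixels) pix)[k]?
      = if k < n then pix[k]?.map (pvRowOp cols k) else pix[k]? := by
  induction n with
  | zero => simp
  | succ n ih =>
      rw [List.range_succ, List.foldl_append, List.foldl_cons, List.foldl_nil,
        pvInnerCollapse]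
      simp only [List.getElem?_modify, ih]
      by_cases h : k = n
      · subst h
        simp only [if_neg (lt_irrefl k), if_pos (Nat.lt_succ_self k)]
        cases pix[k]? <;> simp [pvRowOp]
      · by_cases hk : k < n
        · simp only [if_pos hk, if_pos (Nat.lt_succ_of_lt hk)]
          cases pix[k]? <;> simp [Ne.symm h]
        · have : ¬ k < n + 1 := by omega
          simp only [if_neg hk, if_neg this]
          cases pix[k]? <;> simp [Ne.symm h]

theorem pvA_elem (pix : List (List (Int × Int × Int))) (k : Nat) :
    (space_img pix)[k]? = pix[k]?.map (pvRowOp (pix.headD []).length k) := by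
  unfold space_img
  rw [pvOuterElem]
  by_cases h : k < pix.length
  · simp [h]
  · simp only [if_neg h]
    rw [List.getElem?_eq_none (by omega)]
    simp

theorem pvRowOp_length (cols i : Nat) (row : List (Int × Int × Int)) :
    (pvRowOp cols i row).length = row.length := by
  unfold pvRowOp
  induction cols with
  | zero => simp
  | succ c ih =>
      rw [List.range_succ, List.foldl_append, List.foldl_cons, List.foldl_nil]
      by_cases h : i * c % 2 = 0 <;> simp [h, ih]

theorem pvRowOp_elem (cols i : Nat) (row : List (Int × Int × Int)) (j : Nat) :
    (pvRowOp cols i row)[j]?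
      = if j < cols ∧ i * j % 2 = 0 ∧ j < row.length then some WHITE else row[j]? := by
  unfold pvRowOp
  induction cols with
  | zero => simp
  | succ c ih =>
      rw [List.range_succ, List.foldl_append, List.foldl_cons, List.foldl_nil]
      have hlen : ((List.range c).foldl (fun r j => if i * j % 2 = 0 then r.set j WHITE else r) row).length = row.length := pvRowOp_length c i row
      by_cases h : i * c % 2 = 0
      · simp only [h, if_true, List.getElem?_set, hlen, ih]
        by_cases hjc : c = j
        · subst hjc
          by_cases hcr : c < row.length
          · simp [hcr, h]
          · simp [hcr]
        · simp only [if_neg hjc]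
          have hiff2 : (j < c ∧ i * j % 2 = 0 ∧ j < row.length) ↔ (j < c + 1 ∧ i * j % 2 = 0 ∧ j < row.length) := by
            constructor
            · intro hh; exact ⟨by omega, hh.2⟩
            · intro hh
              refine ⟨?_, hh.2⟩
              rcases Nat.lt_succ_iff_lt_or_eq.mp hh.1 with h1 | h1
              · exact h1
              · exact absurd h1.symm hjc
          exact if_congr hiff2 rfl rfl
      · simp only [h, if_false, ih]
        have hiff2 : (j < c ∧ i * j % 2 = 0 ∧ j < row.length) ↔ (j < c + 1 ∧ i * j % 2 = 0 ∧ j < row.length) := by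
          constructor
          · intro hh; exact ⟨by omega, hh.2⟩
          · intro hh
            refine ⟨?_, hh.2⟩
            rcases Nat.lt_succ_iff_lt_or_eq.mp hh.1 with h1 | h1
            · exact h1
            · subst h1; exact absurd hh.2.1 h
        exact if_congr hiff2 rfl rfl

-- B-side: the stride-2 slice assignment, elementwise
theorem pvStride_len (m : Nat) (row : List (Int × Int × Int)) :
    ((List.range m).foldl (fun r t => r.set (2 * t) WHITE) row).length = row.length := by
  induction m with
  | zero => simp
  | succ c ih =>
      rw [List.range_succ, List.foldl_append, List.foldl_cons, List.foldl_nil]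
      simp [ih]

theorem pvStride_elem (m : Nat) (row : List (Int × Int × Int)) (j : Nat) :
    ((List.range m).foldl (fun r t => r.set (2 * t) WHITE) row)[j]?
      = if j % 2 = 0 ∧ j / 2 < m ∧ j < row.length then some WHITE else row[j]? := by
  induction m with
  | zero => simp
  | succ c ih =>
      rw [List.range_succ, List.foldl_append, List.foldl_cons, List.foldl_nil,
        List.getElem?_set, pvStride_len, ih]
      by_cases hc : 2 * c = j
      · rw [if_pos hc, hc]
        by_cases hr : j < row.length
        · rw [if_pos hr, if_pos (by omega : j % 2 = 0 ∧ j / 2 < c + 1 ∧ j < row.length)]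
        · rw [if_neg hr, if_neg (by omega : ¬(j % 2 = 0 ∧ j / 2 < c + 1 ∧ j < row.length)),
            List.getElem?_eq_none (by omega)]
      · rw [if_neg hc]
        have hiff : (j % 2 = 0 ∧ j / 2 < c ∧ j < row.length)
            ↔ (j % 2 = 0 ∧ j / 2 < c + 1 ∧ j < row.length) := by omega
        exact if_congr hiff rfl rfl

-- elementwise form of B
theorem pvB_elem (pix : List (List (Int × Int × Int))) (k : Nat) :
    (space_img_alt pix)[k]?
      = pix[k]?.map (fun row =>
          let cols := (pix.headD []).length
          if ((k : Int)) % 2 ≠ 0 then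
            (List.range ((cols + 1) / 2)).foldl (fun r t => r.set (2 * t) WHITE) row
          else
            List.replicate cols WHITE ++ row.drop cols) := by
  unfold space_img_alt
  rw [List.getElem?_map, PySem.List.getElem?_enumerate]
  cases pix[k]? <;> simp

-- per-row agreement under the precondition
theorem pvRow_eq (cols k : Nat) (row : List (Int × Int × Int)) (hc : cols ≤ row.length) :
    pvRowOp cols k row
      = if ((k : Int)) % 2 ≠ 0 then
          (List.range ((cols + 1) / 2)).foldl (fun r t => r.set (2 * t) WHITE) row
        else
          List.replicate cols WHITE ++ row.drop cols := by
  apply List.ext_getElem?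
  intro j
  rw [pvRowOp_elem]
  by_cases hk : ((k : Int)) % 2 ≠ 0
  · -- odd row index: k * j even iff j even
    have hk2 : k % 2 = 1 := by omega
    have hmod : k * j % 2 = j % 2 := by
      rw [Nat.mul_mod, hk2, one_mul, Nat.mod_mod_of_dvd _ (dvd_refl 2)]
    rw [if_pos hk, pvStride_elem]
    have hiff : (j < cols ∧ k * j % 2 = 0 ∧ j < row.length)
        ↔ (j % 2 = 0 ∧ j / 2 < (cols + 1) / 2 ∧ j < row.length) := by
      rw [hmod]; omega
    exact if_congr hiff rfl rfl
  · -- even row index: k * j always even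
    have hk2 : k % 2 = 0 := by omega
    have heven : k * j % 2 = 0 := by rw [Nat.mul_mod, hk2]; simp
    rw [if_neg hk]
    by_cases hj : j < cols
    · rw [List.getElem?_append_left (by simpa using hj), List.getElem?_replicate,
        if_pos hj, if_pos ⟨hj, heven, by omega⟩]
    · rw [List.getElem?_append_right (by simpa using not_lt.mp hj), List.length_replicate,
        List.getElem?_drop]
      have hsum : cols + (j - cols) = j := by omega
      rw [hsum, if_neg (fun h => hj h.1)]

theorem pvMain (pix : List (List (Int × Int × Int))) (hpre : Pre_space_img pix) :
    space_img pix = space_img_alt pix := by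
  apply List.ext_getElem?
  intro k
  rw [pvA_elem, pvB_elem]
  cases hx : pix[k]? with
  | none => simp
  | some row =>
      have hmem : row ∈ pix := List.mem_of_getElem? hx
      have hc : (pix.headD []).length ≤ row.length := hpre.2 row hmem
      simp only [Option.map_some]
      rw [pvRow_eq _ _ _ hc]

-- ===== VERDICT (by name: the statement is the Claim_ definition above) =====
theorem space_img_spec : Claim_equal_space_img := by
  intro pix _ hpre
  unfold Spec_space_img
  exact pvMain pix hpre
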